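-- pv_equiv track=rewrite | github.com/JBreitenbr/fCC-Daily-Coding-Challenge | 03-2026.py | smallest_gap
-- ===== SOURCE A (Python) =====
-- def flatten(arr):
--     fl=[]
--     for el in arr:
--         if isinstance(el,list):
--             fl.extend(flatten(el))
--         else:
--             fl.append(el)
--     return fl
--
-- def gaps(arr,stri):
--     res=[]
--     for i in range(1,len(arr)):
--         res.append(stri[arr[i-1]+1:arr[i]])
--     return res
--
-- def smallest_gap(s):
--     l=[]
--     for el in list(set(s)):
--         if len(s.split(el))>2:
--            l.append(el)
--     pre=[]
--     for j in range(len(l)):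
--         ind = [i for i, x in enumerate(list(s)) if x == l[j]]
--         pre.append(gaps(ind,s))
--     w=flatten(pre)
--     sz=[]
--     for el in w:
--         sz.append(len(el))
--     mini=sorted(sz)[0]
--     ms=[]
--     for el in w:
--         if len(el)==mini:
--             ms.append(s.index(el))
--     return s[sorted(ms)[0]:sorted(ms)[0]+mini]
-- ===== SOURCE B (Python) =====
-- def smallest_gap(s):
--     # One pass: record each char's last occurrence; collect the substring between
--     # consecutive occurrences as soon as the second of the pair is seen.
--     last = {}
--     cands = []
--     for i, ch in enumerate(s):
--         if ch in last:
--             cands.append(s[last[ch] + 1:i])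
--         last[ch] = i
--     mini = min(len(c) for c in cands)
--     start = min(s.find(c) for c in cands if len(c) == mini)
--     return s[start:start + mini]
-- ===== Notes on version B (the rewrite author's own statement) =====
-- stated objective: faster
-- what changed: Replaces A's per-distinct-character passes (a split, a full enumerate scan and a gap pass for every distinct character) by one left-to-right pass that keeps each character's last occurrence in a dict and emits the substring between consecutive occurrences immediately; the minimum length and the smallest first-occurrence start are then taken directly with min() instead of sorting.
import Mathlib
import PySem

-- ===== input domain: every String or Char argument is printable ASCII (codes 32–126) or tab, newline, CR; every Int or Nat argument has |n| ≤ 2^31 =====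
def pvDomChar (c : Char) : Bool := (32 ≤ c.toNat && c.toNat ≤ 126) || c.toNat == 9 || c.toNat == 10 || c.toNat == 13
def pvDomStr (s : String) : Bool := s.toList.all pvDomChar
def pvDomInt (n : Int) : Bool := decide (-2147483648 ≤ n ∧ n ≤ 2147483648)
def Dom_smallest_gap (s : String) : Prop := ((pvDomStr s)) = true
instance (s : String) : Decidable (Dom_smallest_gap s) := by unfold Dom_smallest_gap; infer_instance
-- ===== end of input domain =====

-- B replaces A's per-distinct-character scans by one pass with a last-occurrence dict; objective: faster.
-- Neither implementation mutates anything observable.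

-- ===== PORT A =====
-- Each local variable of Python A (l, pre, w, sz, mini, ms) is one definition below,
-- in statement order; helpers flatten and gaps stay helpers.
-- flatten(arr): at its only call site arr : list[list[str]], so isinstance(el, list) is
-- always true and fl.extend(flatten(el)) appends the (already flat) list el.
def flattenA (arr : List (List String)) : List String :=
  arr.foldl (fun fl el => fl ++ el) []

def gapsA (arr : List Int) (stri : String) : List String :=
  (PySem.List.pyRange 1 (PySem.List.len arr) 1).foldl
    (fun res i =>
      res ++ [PySem.Str.slice stri (some (PySem.List.pyGetD arr (i - 1) 0 + 1))
                                   (some (PySem.List.pyGetD arr i 0))]) []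

-- l = [el for el in list(set(s)) if len(s.split(el)) > 2]; list(set(s)) is consumed only to
-- build l and the final result is independent of that order (a global minimum over all gaps),
-- so PySem.Set's first-occurrence order is exact here.  s.split(el): el is one character,
-- never "", so split? is always `some` (the .getD [] default is never used).
def portA_l (s : String) : List Char :=
  (PySem.Set.ofList s.toList).foldl
    (fun l el => if 2 < PySem.List.len ((PySem.Str.split? s (String.ofList [el])).getD [])
                 then l ++ [el] else l) []

def portA_pre (s : String) : List (List String) :=
  (PySem.List.pyRange 0 (PySem.List.len (portA_l s)) 1).foldl
    (fun pre j =>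
      let ind : List Int := (PySem.List.enumerate s.toList).foldl
        (fun acc p => if p.2 == PySem.List.pyGetD (portA_l s) j ' ' then acc ++ [p.1] else acc) []
      pre ++ [gapsA ind s]) []

def portA_w (s : String) : List String := flattenA (portA_pre s)

def portA_sz (s : String) : List Int :=
  (portA_w s).foldl (fun sz el => sz ++ [PySem.Str.len el]) []

-- sorted(sz)[0]: raises IndexError when sz = [] (no duplicate character) — excluded by Pre_
def portA_mini (s : String) : Int :=
  PySem.List.pyGetD (PySem.List.sorted (portA_sz s) (fun x => x)) 0 0

-- s.index(el): el is always a substring of s here, so index = find (no ValueError)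
def portA_ms (s : String) : List Int :=
  (portA_w s).foldl
    (fun ms el => if PySem.Str.len el == portA_mini s then ms ++ [PySem.Str.find s el] else ms) []

def smallest_gap (s : String) : String :=
  PySem.Str.slice s
    (some (PySem.List.pyGetD (PySem.List.sorted (portA_ms s) (fun x => x)) 0 0))
    (some (PySem.List.pyGetD (PySem.List.sorted (portA_ms s) (fun x => x)) 0 0 + portA_mini s))

-- ===== PORT B =====
-- One definition per local of Source B: the loop building (last, cands), then mini and start.
-- min(...) in Source B raises ValueError when there is no duplicate character — excluded by
-- Pre_ (the default 0 of minD is never used under Pre_).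
def altLoop (s : String) : PySem.Dict Char Int × List String :=
  (PySem.List.enumerate s.toList).foldl
    (fun (st : PySem.Dict Char Int × List String) p =>
      match st.1.get? p.2 with
      | some j => (st.1.insert p.2 p.1,
                   st.2 ++ [PySem.Str.slice s (some (j + 1)) (some p.1)])
      | none   => (st.1.insert p.2 p.1, st.2))
    (PySem.Dict.empty, [])

def altCands (s : String) : List String := (altLoop s).2

def altMini (s : String) : Int :=
  PySem.List.minD ((altCands s).map PySem.Str.len) (fun x => x) 0

def altStart (s : String) : Int :=
  PySem.List.minD
    (((altCands s).filter (fun c => PySem.Str.len c == altMini s)).map (PySem.Str.find s))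
    (fun x => x) 0

def smallest_gap_alt (s : String) : String :=
  PySem.Str.slice s (some (altStart s)) (some (altStart s + altMini s))

-- ===== PRECONDITION & SPEC =====
-- Pre_ excludes exactly the strings with no repeated character: there A's sorted(sz)[0]
-- raises IndexError (and B's min(...) raises ValueError), so A returns on all of Pre_.
def Pre_smallest_gap (s : String) : Prop := ¬ s.toList.Nodup
instance (s : String) : Decidable (Pre_smallest_gap s) := by unfold Pre_smallest_gap; infer_instance

def pvWitness_smallest_gap : String := "aa"

def Spec_smallest_gap (s : String) (out : String) : Prop := out = smallest_gap_alt s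
instance (s : String) (out : String) : Decidable (Spec_smallest_gap s out) := by unfold Spec_smallest_gap; infer_instance

-- ===== CLAIM (what is proved, stated in full; the proofs are below) =====
def Claim_equal_smallest_gap : Prop := ∀ (s : String), Dom_smallest_gap s → Pre_smallest_gap s → Spec_smallest_gap s (smallest_gap s)

-- ===== LEMMAS AND PROOFS =====

-- the substring strictly between an occurrence pair
def gapF (s : String) (p : Int × Int) : String :=
  PySem.Str.slice s (some (p.1 + 1)) (some p.2)

-- the (increasing) list of indices at which el occurs in cs
def occL (cs : List Char) (el : Char) : List Int :=
  ((PySem.List.enumerate cs).filter (fun p => p.2 == el)).map (·.1)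

-- index of the last occurrence of el in cs, if any
def lastIdx (cs : List Char) (el : Char) : Option Int := (occL cs el).getLast?

-- adjacent pairs of a list
def adjP (m : List Int) : List (Int × Int) := m.zip m.tail

-- B's pair stream: for each position whose character occurred before, (last previous occurrence, position)
def pairsSpec (cs : List Char) : List (Int × Int) :=
  cs.zipIdx.filterMap (fun p => (lastIdx (cs.take p.2) p.1).map (fun j => (j, (p.2 : Int))))

-- A's pair collection: per duplicated character, adjacent occurrence pairs
def dupl (s : String) : List Char :=
  (PySem.Set.ofList s.toList).filter
    (fun el => 2 < PySem.List.len ((PySem.Str.split? s (String.ofList [el])).getD []))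

def pairsA (s : String) : List (Int × Int) :=
  (dupl s).flatMap (fun el => adjP (occL s.toList el))

-- ---- s.split(c) has count(c)+1 pieces ----
theorem splitOn_go_single (c : Char) (fuel : Nat) : ∀ (l cur : List Char) (acc : List (List Char)),
    l.length < fuel →
    (PySem.Chars.splitOn.go [c] fuel l cur acc).length = acc.length + 1 + l.count c := by
  induction fuel with
  | zero => intro l cur acc h; omega
  | succ n ih =>
    intro l cur acc h
    cases l with
    | nil => simp [PySem.Chars.splitOn.go]
    | cons x rest =>
      rw [PySem.Chars.splitOn.go]
      by_cases hx : c = x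
      · subst hx
        simp only [List.isPrefixOf, BEq.rfl, Bool.and_true, if_pos]
        rw [ih]
        · simp; omega
        · simpa using Nat.lt_of_succ_lt_succ h
      · have : [c].isPrefixOf (x :: rest) = false := by simp [List.isPrefixOf, hx]
        rw [this]
        simp only [Bool.false_eq_true, if_false]
        rw [ih rest (x :: cur) acc (by simpa using Nat.lt_of_succ_lt_succ h)]
        simp [Ne.symm hx]

theorem length_splitOn_single (cs : List Char) (c : Char) :
    (PySem.Chars.splitOn cs [c]).length = cs.count c + 1 := by
  rw [PySem.Chars.splitOn, splitOn_go_single c (cs.length + 1) cs [] [] (by omega)]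
  simp; omega

theorem split_gt_two_iff (s : String) (el : Char) :
    (2 < PySem.List.len ((PySem.Str.split? s (String.ofList [el])).getD [])) ↔ 2 ≤ s.toList.count el := by
  have h := PySem.Str.split?_map s (String.ofList [el])
  have hsep : (String.ofList [el]).toList = [el] := by simp
  rw [hsep] at h
  rw [PySem.Chars.split?] at h
  simp only [List.isEmpty, Bool.false_eq_true, if_false] at h
  cases hs : PySem.Str.split? s (String.ofList [el]) with
  | none => rw [hs] at h; simp at h
  | some parts =>
    rw [hs] at h
    simp only [Option.map_some, Option.some.injEq] at h
    have hlen : parts.length = (PySem.Chars.splitOn s.toList [el]).length := by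
      rw [← h, List.length_map]
    simp only [Option.getD_some, PySem.List.len_eq, hlen, length_splitOn_single]
    omega

-- ---- gaps(arr, s) lists the slices between adjacent entries of arr ----
theorem gapsA_eq (arr : List Int) (s : String) :
    gapsA arr s = (adjP arr).map (gapF s) := by
  rw [gapsA, PySem.List.foldl_append_singleton_eq_map, List.nil_append]
  apply List.ext_getElem
  · simp [adjP, PySem.List.length_pyRange_one]
  · intro k h1 h2
    simp only [List.getElem_map, PySem.List.getElem_pyRange_one, adjP, List.getElem_zip,
      List.getElem_tail, gapF]
    have hk : k + 1 < arr.length := by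
      simp [adjP] at h2; omega
    have e1 : (1 : Int) + (k : Int) - 1 = ((k : Nat) : Int) := by omega
    have e2 : (1 : Int) + (k : Int) = (((k + 1 : Nat)) : Int) := by push_cast; omega
    rw [e1, e2, PySem.List.pyGetD_natCast, PySem.List.pyGetD_natCast]
    simp [List.getD_eq_getElem?_getD, hk, Nat.lt_of_succ_lt hk]

-- ---- occurrence lists ----
theorem mem_occL (cs : List Char) (el : Char) (k : Int) :
    k ∈ occL cs el ↔ ∃ b : Nat, ∃ h : b < cs.length, k = (b : Int) ∧ cs[b] = el := by
  simp only [occL, List.mem_map, List.mem_filter]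
  constructor
  · rintro ⟨p, ⟨hp, hel⟩, rfl⟩
    rcases (PySem.List.mem_enumerate_iff cs 0 p).1 hp with ⟨b, hb, rfl⟩
    exact ⟨b, hb, by simp, by simpa using hel⟩
  · rintro ⟨b, hb, rfl, hel⟩
    refine ⟨((b : Int), cs[b]), ⟨(PySem.List.mem_enumerate_iff cs 0 _).2 ⟨b, hb, by simp⟩, by simpa⟩, rfl⟩

theorem occL_pairwise (cs : List Char) (el : Char) : (occL cs el).Pairwise (· < ·) := by
  apply List.Pairwise.map
  · exact fun a b h => h
  · exact (PySem.List.pairwise_lt_enumerate cs 0).filter _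

theorem length_occL (cs : List Char) (el : Char) : (occL cs el).length = cs.count el := by
  rw [occL, List.length_map]
  have h2 : cs.count el = ((PySem.List.enumerate cs).map (·.2)).count el := by
    rw [PySem.List.map_snd_enumerate]
  rw [h2, List.count_eq_countP, List.countP_map, ← List.countP_eq_length_filter]
  rfl

theorem enumerate_take (cs : List Char) (b : Nat) :
    PySem.List.enumerate (cs.take b) 0 = (PySem.List.enumerate cs).filter (fun p => decide (p.1 < (b : Int))) := by
  conv_rhs => rw [← List.take_append_drop b cs]
  rw [PySem.List.enumerate_append, List.filter_append]
  have h1 : (PySem.List.enumerate (cs.take b) 0).filter (fun p => decide (p.1 < (b : Int)))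
      = PySem.List.enumerate (cs.take b) 0 := by
    apply List.filter_eq_self.2
    intro p hp
    rcases (PySem.List.mem_enumerate_iff _ _ _).1 hp with ⟨k, hk, rfl⟩
    simp only [List.length_take] at hk
    simp; omega
  have h2 : (PySem.List.enumerate (cs.drop b) (0 + (cs.take b).length)).filter (fun p => decide (p.1 < (b : Int))) = [] := by
    apply List.filter_eq_nil_iff.2
    intro p hp
    rcases (PySem.List.mem_enumerate_iff _ _ _).1 hp with ⟨k, hk, rfl⟩
    by_cases hble : b ≤ cs.length
    · simp only [List.length_take] at *; simp; omega
    · simp only [List.length_drop] at hk; omega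
  rw [h1, h2, List.append_nil]

theorem occL_take (cs : List Char) (el : Char) (b : Nat) :
    occL (cs.take b) el = (occL cs el).filter (fun k => decide (k < (b : Int))) := by
  rw [occL, occL, enumerate_take, List.filter_comm, List.filter_map]
  rfl

-- ---- adjacent pairs of a strictly increasing list ----
theorem filter_lt_eq_take (m : List Int) (hm : m.Pairwise (· < ·)) (k : Nat) (hk : k < m.length)
    (v : Int) (hv : m[k] = v) :
    m.filter (fun x => decide (x < v)) = m.take k := by
  have hpw := List.pairwise_iff_getElem.1 hm
  conv_lhs => rw [← List.take_append_drop k m]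
  rw [List.filter_append]
  have h1 : (m.take k).filter (fun x => decide (x < v)) = m.take k := by
    apply List.filter_eq_self.2
    intro x hx
    rcases List.mem_iff_getElem.1 hx with ⟨t, ht, rfl⟩
    have ht' : t < k := by simp at ht; omega
    rw [List.getElem_take]
    simp only [decide_eq_true_eq, ← hv]
    exact hpw t k (by omega) hk (by omega)
  have h2 : (m.drop k).filter (fun x => decide (x < v)) = [] := by
    apply List.filter_eq_nil_iff.2
    intro x hx
    rcases List.mem_iff_getElem.1 hx with ⟨t, ht, rfl⟩
    rw [List.getElem_drop]
    simp only [decide_eq_true_eq, not_lt, ← hv]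
    rcases Nat.eq_zero_or_pos t with h | h
    · subst h; simp
    · have := hpw k (k + t) hk (by simp at ht; omega) (by omega)
      omega
  rw [h1, h2, List.append_nil]

theorem mem_adjP (m : List Int) (hm : m.Pairwise (· < ·)) (j i : Int) :
    (j, i) ∈ adjP m ↔ i ∈ m ∧ (m.filter (fun k => decide (k < i))).getLast? = some j := by
  constructor
  · intro h
    rcases List.mem_iff_getElem.1 h with ⟨t, ht, hz⟩
    have htl : t < m.length ∧ t + 1 < m.length := by
      simp [adjP, List.length_zip] at ht; omega
    have hz' : (m[t], m[t+1]) = (j, i) := by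
      rw [← hz]; simp [adjP, List.getElem_zip, List.getElem_tail]
    have hj : m[t] = j := by simpa using congrArg Prod.fst hz'
    have hi : m[t+1] = i := by simpa using congrArg Prod.snd hz'
    constructor
    · exact hi ▸ List.getElem_mem htl.2
    · rw [filter_lt_eq_take m hm (t+1) htl.2 i hi]
      rw [List.getLast?_eq_getElem?]
      have hlen : (m.take (t+1)).length = t + 1 := by simp; omega
      rw [hlen]
      simp [List.getElem?_eq_getElem htl.1, hj]
  · rintro ⟨hi, hlast⟩
    rcases List.mem_iff_getElem.1 hi with ⟨k, hk, hkv⟩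
    rw [filter_lt_eq_take m hm k hk i hkv, List.getLast?_eq_getElem?] at hlast
    rcases Nat.eq_zero_or_pos k with h0 | h0
    · subst h0; simp at hlast
    · have hlen : (m.take k).length = k := by simp; omega
      rw [hlen, List.getElem?_take] at hlast
      have hk1 : k - 1 < k := by omega
      rw [if_pos hk1, List.getElem?_eq_getElem (by omega)] at hlast
      have hj : m[k-1] = j := by simpa using hlast
      have hmem : k - 1 < (adjP m).length := by simp [adjP, List.length_zip]; omega
      refine List.mem_iff_getElem.2 ⟨k - 1, hmem, ?_⟩
      simp only [adjP, List.getElem_zip, List.getElem_tail]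
      have hg : m[k - 1 + 1]'(by omega) = m[k]'hk := by
        congr 1; omega
      rw [hg, hj, hkv]

theorem adjP_nodup (m : List Int) (hm : m.Pairwise (· < ·)) : (adjP m).Nodup := by
  have hpw := List.pairwise_iff_getElem.1 hm
  apply List.pairwise_iff_getElem.2
  intro a b ha hb hab
  have ha' : a + 1 < m.length := by simp [adjP, List.length_zip] at ha; omega
  have hb' : b + 1 < m.length := by simp [adjP, List.length_zip] at hb; omega
  simp only [adjP, List.getElem_zip, List.getElem_tail, ne_eq, Prod.mk.injEq, not_and]
  intro _
  have := hpw (a+1) (b+1) ha' hb' (by omega)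
  omega

-- ---- membership and nodup of the two pair collections ----
theorem mem_zipIdx_iff (cs : List Char) (p : Char × Nat) :
    p ∈ cs.zipIdx ↔ ∃ b : Nat, ∃ h : b < cs.length, p = (cs[b], b) := by
  constructor
  · intro h
    rcases List.mem_iff_getElem.1 h with ⟨t, ht, hv⟩
    have ht' : t < cs.length := by simpa using ht
    exact ⟨t, ht', by rw [← hv, List.getElem_zipIdx]; simp⟩
  · rintro ⟨b, hb, rfl⟩
    refine List.mem_iff_getElem.2 ⟨b, by simpa using hb, ?_⟩
    rw [List.getElem_zipIdx]; simp

theorem mem_pairsSpec (cs : List Char) (j i : Int) :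
    (j, i) ∈ pairsSpec cs ↔ ∃ b : Nat, ∃ h : b < cs.length,
      i = (b : Int) ∧ lastIdx (cs.take b) cs[b] = some j := by
  rw [pairsSpec, List.mem_filterMap]
  constructor
  · rintro ⟨p, hp, hf⟩
    rcases (mem_zipIdx_iff cs p).1 hp with ⟨b, hb, rfl⟩
    simp only [Option.map_eq_some_iff] at hf
    rcases hf with ⟨j', hj', hji⟩
    have h1 : j' = j := by simpa using congrArg Prod.fst hji
    have h2 : ((b : Nat) : Int) = i := by simpa using congrArg Prod.snd hji
    exact ⟨b, hb, h2.symm, h1 ▸ hj'⟩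
  · rintro ⟨b, hb, rfl, hl⟩
    exact ⟨(cs[b], b), (mem_zipIdx_iff cs _).2 ⟨b, hb, rfl⟩, by simp [hl]⟩

theorem pairsSpec_nodup (cs : List Char) : (pairsSpec cs).Nodup := by
  have hpw : (pairsSpec cs).Pairwise (fun p q => p.2 < q.2) := by
    rw [pairsSpec, List.pairwise_filterMap]
    have : cs.zipIdx.Pairwise (fun a b => a.2 < b.2) := by
      apply List.pairwise_iff_getElem.2
      intro a b ha hb hab
      rw [List.getElem_zipIdx, List.getElem_zipIdx]
      simpa using hab
    apply this.imp
    intro a b h x hx y hy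
    simp only [Option.map_eq_some_iff] at hx hy
    rcases hx with ⟨_, _, rfl⟩
    rcases hy with ⟨_, _, rfl⟩
    simpa using h
  exact hpw.imp (fun h => by intro he; rw [he] at h; omega)

theorem mem_dupl (s : String) (el : Char) :
    el ∈ dupl s ↔ 2 ≤ s.toList.count el := by
  rw [dupl, List.mem_filter]
  constructor
  · rintro ⟨_, h⟩
    exact (split_gt_two_iff s el).1 (by simpa using h)
  · intro h
    refine ⟨(PySem.Set.mem_ofList _ _).2 ?_, by simpa using (split_gt_two_iff s el).2 h⟩
    exact List.count_pos_iff.1 (by omega)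

theorem two_le_count (cs : List Char) (el : Char) (j i : Int) (hj : j ∈ occL cs el)
    (hi : i ∈ occL cs el) (hne : j ≠ i) : 2 ≤ cs.count el := by
  rcases List.mem_iff_getElem.1 hj with ⟨k1, h1, e1⟩
  rcases List.mem_iff_getElem.1 hi with ⟨k2, h2, e2⟩
  have : k1 ≠ k2 := by rintro rfl; exact hne (e1 ▸ e2 ▸ rfl)
  have := length_occL cs el
  omega

theorem mem_pairsA (s : String) (j i : Int) :
    (j, i) ∈ pairsA s ↔ ∃ b : Nat, ∃ h : b < s.toList.length,
      i = (b : Int) ∧ lastIdx (s.toList.take b) s.toList[b] = some j := by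
  rw [pairsA, List.mem_flatMap]
  constructor
  · rintro ⟨el, hel, hadj⟩
    rcases (mem_adjP _ (occL_pairwise _ _) j i).1 hadj with ⟨him, hlast⟩
    rcases (mem_occL _ _ _).1 him with ⟨b, hb, rfl, hbel⟩
    refine ⟨b, hb, rfl, ?_⟩
    rw [lastIdx, occL_take, hbel]
    exact hlast
  · rintro ⟨b, hb, rfl, hl⟩
    refine ⟨s.toList[b], ?_, ?_⟩
    · rw [mem_dupl]
      rw [lastIdx, occL_take] at hl
      have hjm := List.mem_of_mem_filter (List.mem_of_getLast? hl)
      have hjlt : (j < (b:Int)) := by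
        have := List.of_mem_filter (List.mem_of_getLast? hl)
        simpa using this
      have hbm : ((b:Int)) ∈ occL s.toList s.toList[b] := (mem_occL _ _ _).2 ⟨b, hb, rfl, rfl⟩
      exact two_le_count _ _ j b hjm hbm (by omega)
    · rw [mem_adjP _ (occL_pairwise _ _)]
      rw [lastIdx, occL_take] at hl
      exact ⟨(mem_occL _ _ _).2 ⟨b, hb, rfl, rfl⟩, hl⟩

theorem pairsA_nodup (s : String) : (pairsA s).Nodup := by
  rw [pairsA, List.nodup_flatMap]
  constructor
  · exact fun el _ => adjP_nodup _ (occL_pairwise _ _)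
  · have hnd : (dupl s).Nodup := (PySem.Set.nodup_ofList s.toList).filter _
    apply hnd.imp_of_mem
    intro el el' _ _ hne
    rw [Function.onFun]
    intro q hq hq'
    rcases q with ⟨j, i⟩
    rcases (mem_adjP _ (occL_pairwise _ _) j i).1 hq with ⟨hi, _⟩
    rcases (mem_adjP _ (occL_pairwise _ _) j i).1 hq' with ⟨hi', _⟩
    rcases (mem_occL _ _ _).1 hi with ⟨b, hb, hbi, hbel⟩
    rcases (mem_occL _ _ _).1 hi' with ⟨b', hb', hbi', hbel'⟩
    have hbb : b = b' := by omega
    subst hbb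
    exact hne (hbel ▸ hbel' ▸ rfl)

theorem pairsA_perm (s : String) : (pairsA s).Perm (pairsSpec s.toList) := by
  rw [List.perm_ext_iff_of_nodup (pairsA_nodup s) (pairsSpec_nodup s.toList)]
  rintro ⟨j, i⟩
  rw [mem_pairsA, mem_pairsSpec]

-- ---- the two ports compute their gap lists ----
theorem preW (s : String) (L : List Char) :
    (PySem.List.pyRange 0 (PySem.List.len L) 1).foldl
      (fun (pre : List (List String)) j =>
        pre ++ [gapsA ((PySem.List.enumerate s.toList).foldl
          (fun acc p => if p.2 == PySem.List.pyGetD L j ' ' then acc ++ [p.1] else acc) []) s]) []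
    = L.map (fun el => (adjP (occL s.toList el)).map (gapF s)) := by
  simp only [PySem.List.len_eq]
  rw [PySem.List.foldl_pyRange_zero_pyGetD' L ' '
      (f := fun (pre : List (List String)) (el : Char) =>
        pre ++ [gapsA ((PySem.List.enumerate s.toList).foldl
          (fun acc p => if p.2 == el then acc ++ [p.1] else acc) []) s]) []]
  simp only [PySem.List.foldl_append_singleton_eq_map, PySem.List.foldl_append_if,
    List.nil_append, gapsA_eq]
  simp [occL]

theorem portA_l_eq (s : String) : portA_l s = dupl s := by
  rw [portA_l, PySem.List.foldl_append_ite_eq_filter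
    (p := fun el => 2 < PySem.List.len ((PySem.Str.split? s (String.ofList [el])).getD []))]
  rw [List.nil_append, dupl]

theorem portA_w_eq (s : String) : portA_w s = (pairsA s).map (gapF s) := by
  rw [portA_w, portA_pre, portA_l_eq]
  rw [preW]
  rw [flattenA, PySem.List.foldl_append_eq_flatten, List.nil_append, ← List.flatMap_def]
  rw [pairsA, List.map_flatMap]

theorem portA_sz_eq (s : String) : portA_sz s = (portA_w s).map PySem.Str.len := by
  rw [portA_sz, PySem.List.foldl_append_singleton_eq_map, List.nil_append]

theorem portA_ms_eq (s : String) :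
    portA_ms s = ((portA_w s).filter (fun el => PySem.Str.len el == portA_mini s)).map (PySem.Str.find s) := by
  rw [portA_ms, PySem.List.foldl_append_if, List.nil_append]

-- ---- B's loop produces exactly the pairsSpec gaps ----
theorem occL_append (cs : List Char) (c el : Char) :
    occL (cs ++ [c]) el = occL cs el ++ (if el = c then [((cs.length : Int))] else []) := by
  rw [occL, occL, PySem.List.enumerate_append, List.filter_append, List.map_append]
  congr 1
  rw [PySem.List.enumerate_cons, PySem.List.enumerate_nil]
  by_cases h : el = c
  · subst h; simp
  · simp [Ne.symm h, h]

theorem lastIdx_append (cs : List Char) (c el : Char) :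
    lastIdx (cs ++ [c]) el = if el = c then some ((cs.length : Int)) else lastIdx cs el := by
  rw [lastIdx, occL_append]
  by_cases h : el = c
  · simp [h]
  · simp [h, lastIdx]

theorem pairsSpec_append (cs : List Char) (c : Char) :
    pairsSpec (cs ++ [c]) = pairsSpec cs ++
      ((lastIdx cs c).map (fun j => (j, (cs.length : Int)))).toList := by
  rw [pairsSpec, pairsSpec, List.zipIdx_append, List.filterMap_append]
  congr 1
  · apply List.filterMap_congr
    intro p hp
    rcases List.mem_iff_getElem.1 hp with ⟨t, ht, rfl⟩
    rw [List.getElem_zipIdx]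
    have ht' : t < cs.length := by simpa using ht
    rw [List.take_append_of_le_length (by simpa using Nat.le_of_lt ht')]
  · rw [List.zipIdx_singleton]
    simp only [List.filterMap_cons, List.filterMap_nil]
    have he : List.take (0 + cs.length) (cs ++ [c]) = cs := by
      simp
    rw [he]
    cases h : lastIdx cs c with
    | none => simp
    | some j => simp

theorem altLoop_spec (s : String) (cs : List Char) :
    ((PySem.List.enumerate cs).foldl
      (fun (st : PySem.Dict Char Int × List String) p =>
        match st.1.get? p.2 with
        | some j => (st.1.insert p.2 p.1,
                     st.2 ++ [PySem.Str.slice s (some (j + 1)) (some p.1)])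
        | none   => (st.1.insert p.2 p.1, st.2))
      (PySem.Dict.empty, [])).2 = (pairsSpec cs).map (gapF s)
    ∧ ∀ c, ((PySem.List.enumerate cs).foldl
      (fun (st : PySem.Dict Char Int × List String) p =>
        match st.1.get? p.2 with
        | some j => (st.1.insert p.2 p.1,
                     st.2 ++ [PySem.Str.slice s (some (j + 1)) (some p.1)])
        | none   => (st.1.insert p.2 p.1, st.2))
      (PySem.Dict.empty, [])).1.get? c = lastIdx cs c := by
  induction cs using List.reverseRecOn with
  | nil => constructor
           · rfl
           · intro c; rfl
  | append_singleton cs c ih =>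
    rcases ih with ⟨ih2, ih1⟩
    rw [PySem.List.enumerate_append, List.foldl_append, PySem.List.enumerate_cons,
        PySem.List.enumerate_nil]
    simp only [List.foldl_cons, List.foldl_nil]
    set F := (fun (st : PySem.Dict Char Int × List String) (p : Int × Char) =>
        match st.1.get? p.2 with
        | some j => (st.1.insert p.2 p.1,
                     st.2 ++ [PySem.Str.slice s (some (j + 1)) (some p.1)])
        | none   => (st.1.insert p.2 p.1, st.2)) with hF
    set st0 := (PySem.List.enumerate cs).foldl F (PySem.Dict.empty, []) with hst0
    have hget := ih1 c
    constructor
    · rw [pairsSpec_append, List.map_append]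
      cases hL : lastIdx cs c with
      | none =>
        rw [hget, hL]
        simp [ih2]
      | some j =>
        rw [hget, hL]
        simp only [Option.map_some, Option.toList_some, List.map_cons, List.map_nil]
        rw [ih2]
        simp [gapF]
    · intro c'
      cases hL : st0.1.get? c with
      | none =>
        dsimp only
        rw [lastIdx_append]
        by_cases hc : c' = c
        · subst hc
          rw [PySem.Dict.get?_insert_self]
          simp
        · rw [PySem.Dict.get?_insert_of_ne (hne := hc), ih1 c', if_neg hc]
      | some j =>
        dsimp only
        rw [lastIdx_append]
        by_cases hc : c' = c
        · subst hc
          rw [PySem.Dict.get?_insert_self]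
          simp
        · rw [PySem.Dict.get?_insert_of_ne (hne := hc), ih1 c', if_neg hc]

theorem altCands_eq (s : String) : altCands s = (pairsSpec s.toList).map (gapF s) := by
  rw [altCands, altLoop]
  exact (altLoop_spec s s.toList).1

-- ---- extremum transfer between sorted(.)[0] and min(.) ----
theorem sortedHead_eq_minD (xs ys : List Int) (hp : xs.Perm ys) (hne : xs ≠ []) :
    PySem.List.pyGetD (PySem.List.sorted xs (fun x => x)) 0 0 = PySem.List.minD ys (fun x => x) 0 := by
  have hsne : PySem.List.sorted xs (fun x => x) ≠ [] := by
    intro h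
    exact hne ((PySem.List.sorted_eq_nil_iff xs _ _).1 h)
  cases hs : PySem.List.sorted xs (fun x => x) with
  | nil => exact absurd hs hsne
  | cons m t =>
    rw [PySem.List.pyGetD_zero_cons]
    have hyne : ys ≠ [] := fun h => hne (List.Perm.eq_nil (h ▸ hp))
    have hmin_mem : PySem.List.minD ys (fun x => x) 0 ∈ ys := PySem.List.minD_mem ys _ 0 hyne
    have hm_mem : m ∈ xs := by
      have : m ∈ PySem.List.sorted xs (fun x => x) := by rw [hs]; exact List.mem_cons_self
      exact (PySem.List.mem_sorted xs _ _ m).1 this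
    have h1 : m ≤ PySem.List.minD ys (fun x => x) 0 :=
      PySem.List.key_head_sorted_le xs _ hs _ (hp.mem_iff.2 hmin_mem)
    have h2 : PySem.List.minD ys (fun x => x) 0 ≤ m :=
      PySem.List.minD_id_le ys 0 m (hp.mem_iff.1 hm_mem)
    omega

theorem pairsA_ne_nil (s : String) (h : Pre_smallest_gap s) : pairsA s ≠ [] := by
  rw [Pre_smallest_gap, List.nodup_iff_count_le_one] at h
  obtain ⟨c, hc⟩ := not_forall.1 h
  have hcount : 2 ≤ s.toList.count c := by omega
  have hdup : c ∈ dupl s := (mem_dupl s c).2 hcount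
  have hlen : 0 < (adjP (occL s.toList c)).length := by
    have := length_occL s.toList c
    simp only [adjP, List.length_zip, List.length_tail]
    omega
  obtain ⟨q, hq⟩ : ∃ q, q ∈ adjP (occL s.toList c) := by
    cases hl : adjP (occL s.toList c) with
    | nil => rw [hl] at hlen; simp at hlen
    | cons a t => exact ⟨a, List.mem_cons_self⟩
  have : q ∈ pairsA s := by
    rw [pairsA, List.mem_flatMap]
    exact ⟨c, hdup, hq⟩
  exact List.ne_nil_of_mem this

-- ---- assembly ----
theorem mini_eq (s : String) (h : Pre_smallest_gap s) : portA_mini s = altMini s := by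
  rw [portA_mini, portA_sz_eq, portA_w_eq, altMini, altCands_eq]
  apply sortedHead_eq_minD
  · exact ((pairsA_perm s).map (gapF s)).map PySem.Str.len
  · simp [pairsA_ne_nil s h]

theorem mini_mem (s : String) (h : Pre_smallest_gap s) :
    ∃ el ∈ portA_w s, PySem.Str.len el = portA_mini s := by
  have hszne : portA_sz s ≠ [] := by
    rw [portA_sz_eq, portA_w_eq]
    simp [pairsA_ne_nil s h]
  have hsne : PySem.List.sorted (portA_sz s) (fun x => x) ≠ [] := by
    intro hnil
    exact hszne ((PySem.List.sorted_eq_nil_iff _ _ _).1 hnil)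
  cases hs : PySem.List.sorted (portA_sz s) (fun x => x) with
  | nil => exact absurd hs hsne
  | cons m t =>
    have hmem : portA_mini s ∈ portA_sz s := by
      rw [portA_mini, hs, PySem.List.pyGetD_zero_cons]
      have : m ∈ PySem.List.sorted (portA_sz s) (fun x => x) := by
        rw [hs]; exact List.mem_cons_self
      exact (PySem.List.mem_sorted _ _ _ m).1 this
    rw [portA_sz_eq] at hmem
    rcases List.mem_map.1 hmem with ⟨el, hel, helen⟩
    exact ⟨el, hel, helen⟩

theorem start_eq (s : String) (h : Pre_smallest_gap s) :
    PySem.List.pyGetD (PySem.List.sorted (portA_ms s) (fun x => x)) 0 0 = altStart s := by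
  rw [portA_ms_eq, altStart, altCands_eq, mini_eq s h]
  apply sortedHead_eq_minD
  · refine List.Perm.map _ (List.Perm.filter _ ?_)
    rw [portA_w_eq]
    exact (pairsA_perm s).map (gapF s)
  · rcases mini_mem s h with ⟨el, hel, helen⟩
    have : el ∈ (portA_w s).filter (fun el => PySem.Str.len el == altMini s) := by
      rw [List.mem_filter]
      exact ⟨hel, by rw [helen, mini_eq s h]; exact beq_self_eq_true _⟩
    intro hnil
    have hfe : (portA_w s).filter (fun el => PySem.Str.len el == altMini s) = [] :=
      List.map_eq_nil_iff.1 hnil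
    rw [hfe] at this
    simp at this

-- ===== VERDICT (by name: the statement is the Claim_ definition above) =====
theorem smallest_gap_spec : Claim_equal_smallest_gap := by
  intro s _ hpre
  show smallest_gap s = smallest_gap_alt s
  rw [smallest_gap, smallest_gap_alt, start_eq s hpre, mini_eq s hpre]
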